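-- pv_equiv track=rewrite | github.com/ceryshughes/WordEdgeEnglishSyllabification | generate_wug_onsets.py | onset_possibilities
-- ===== SOURCE A (Python) =====
-- def onset_possibilities(n, prefix, consonants):
--     if n == len(prefix):
--         return [prefix]
--     else:
--         possibilities = []
--         for cons in consonants: #go through each possible consonant extension
--             #if len(prefix) == 0 or cons != prefix[len(prefix) - 1]: #Prevent CC duplicates
--             if cons not in prefix: #Prevent duplicates anywhere - decrease the number of possibilities
--                 possibilities += onset_possibilities(n, prefix + [cons], consonants)
--         return possibilities
-- ===== SOURCE B (Python) =====
-- def onset_possibilities(n, prefix, consonants):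
--     if n < len(prefix):
--         return []
--     level = [prefix]
--     for _ in range(n - len(prefix)):
--         if not level:
--             break
--         level = [p + [c] for p in level for c in consonants if c not in p]
--     return level
-- ===== Notes on version B (the rewrite author's own statement) =====
-- stated objective: alternative
-- what changed: Replaced the recursive depth-first extension with an iterative breadth-first level expansion: starting from [prefix], one comprehension pass per remaining slot extends every partial onset by each unused consonant, which yields the same lexicographic-by-consonant-index order without recursion.
import Mathlib
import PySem

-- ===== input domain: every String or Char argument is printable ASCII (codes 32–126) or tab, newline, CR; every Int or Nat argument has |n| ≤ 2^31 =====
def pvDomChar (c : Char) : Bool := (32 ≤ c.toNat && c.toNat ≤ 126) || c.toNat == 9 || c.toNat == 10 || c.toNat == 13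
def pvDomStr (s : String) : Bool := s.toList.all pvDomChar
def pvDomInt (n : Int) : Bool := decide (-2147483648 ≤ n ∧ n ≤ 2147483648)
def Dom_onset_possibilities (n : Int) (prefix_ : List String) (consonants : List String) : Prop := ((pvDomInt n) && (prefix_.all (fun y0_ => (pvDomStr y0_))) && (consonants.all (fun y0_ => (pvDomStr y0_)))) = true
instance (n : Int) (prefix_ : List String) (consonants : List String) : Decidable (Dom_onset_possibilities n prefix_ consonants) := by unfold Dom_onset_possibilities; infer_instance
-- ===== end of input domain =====

-- B is a structurally different implementation (iterative level-by-level expansion instead of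
-- recursion); same return value everywhere, same cost.

-- ===== PORT A =====
-- Recursive DFS: extend the prefix by each consonant not already in it, concatenating results
-- in consonant order. Terminates because each call strictly shrinks the set of usable consonants.
def onset_possibilities (n : Int) (prefix_ : List String) (consonants : List String) : List (List String) :=
  if n = (prefix_.length : Int) then [prefix_]
  else
    consonants.attach.flatMap (fun c =>
      if prefix_.contains c.1 then []
      else onset_possibilities n (prefix_ ++ [c.1]) consonants)
termination_by (consonants.filter (fun x => !prefix_.contains x)).length
decreasing_by
  rename_i _hmem hni
  have hc : c.1 ∈ consonants := c.2
  have hfilter : (consonants.filter (fun x => !(prefix_ ++ [c.1]).contains x))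
      = (consonants.filter (fun x => !prefix_.contains x)).filter (fun x => !(x == c.1)) := by
    rw [List.filter_filter]
    apply List.filter_congr
    intro x _
    simp [beq_eq_decide, Bool.and_comm]
  rw [hfilter]
  apply List.length_filter_lt_length_iff_exists.mpr
  refine ⟨c.1, ?_, by simp⟩
  simp only [List.mem_filter, hc, true_and]
  simpa using hni

-- ===== PORT B =====
-- one comprehension pass: extend every partial onset by each consonant not already in it
def pvStep (consonants : List String) (level : List (List String)) : List (List String) :=
  level.flatMap (fun p => (consonants.filter (fun c => !p.contains c)).map (fun c => p ++ [c]))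

-- the range loop with its early break on an empty level, as a recursion on the remaining count
def pvLoop (consonants : List String) : Nat → List (List String) → List (List String)
  | 0, level => level
  | k + 1, level => if level = [] then level else pvLoop consonants k (pvStep consonants level)

def onset_possibilities_alt (n : Int) (prefix_ : List String) (consonants : List String) : List (List String) :=
  if n < (prefix_.length : Int) then []
  else pvLoop consonants (n - prefix_.length).toNat [prefix_]

-- ===== PRECONDITION & SPEC =====
def Spec_onset_possibilities (n : Int) (prefix_ : List String) (consonants : List String) (out : List (List String)) : Prop := out = onset_possibilities_alt n prefix_ consonants
instance (n : Int) (prefix_ : List String) (consonants : List String) (out : List (List String)) : Decidable (Spec_onset_possibilities n prefix_ consonants out) := by unfold Spec_onset_possibilities; infer_instance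

-- ===== CLAIM (what is proved, stated in full; the proofs are below) =====
def Claim_equal_onset_possibilities : Prop := ∀ (n : Int) (prefix_ : List String) (consonants : List String), Dom_onset_possibilities n prefix_ consonants → Spec_onset_possibilities n prefix_ consonants (onset_possibilities n prefix_ consonants)

-- ===== LEMMAS AND PROOFS =====

theorem pvStep_append (consonants : List String) (xs ys : List (List String)) :
    pvStep consonants (xs ++ ys) = pvStep consonants xs ++ pvStep consonants ys := by
  simp [pvStep]

theorem pvStep_iter_append (consonants : List String) (k : ℕ) (xs ys : List (List String)) :
    (pvStep consonants)^[k] (xs ++ ys) = (pvStep consonants)^[k] xs ++ (pvStep consonants)^[k] ys := by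
  induction k generalizing xs ys with
  | zero => simp
  | succ k ih => simp [Function.iterate_succ_apply, pvStep_append, ih]

theorem pvStep_iter_flatMap {α : Type} (consonants : List String) (k : ℕ) (l : List α)
    (f : α → List (List String)) :
    (pvStep consonants)^[k] (l.flatMap f) = l.flatMap (fun a => (pvStep consonants)^[k] (f a)) := by
  induction l with
  | nil => simp [Function.iterate_fixed (f := pvStep consonants) (x := ([] : List (List String))) rfl]
  | cons a l ih => simp [List.flatMap_cons, pvStep_iter_append, ih]

theorem pvLoop_eq_iterate (consonants : List String) (k : ℕ) (level : List (List String)) :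
    pvLoop consonants k level = (pvStep consonants)^[k] level := by
  induction k generalizing level with
  | zero => rfl
  | succ k ih =>
    rw [pvLoop, Function.iterate_succ_apply]
    by_cases h : level = []
    · subst h
      rw [if_pos rfl]
      exact (Function.iterate_fixed (f := pvStep consonants) rfl k).symm
    · rw [if_neg h, ih]

-- flatMap over attach-with-guard = flatMap over the filtered list
theorem attach_guard_flatMap (consonants prefix_ : List String)
    (f : String → List (List String)) :
    (consonants.attach.flatMap (fun c => if prefix_.contains c.1 then [] else f c.1))
      = (consonants.filter (fun x => !prefix_.contains x)).flatMap f := by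
  induction consonants with
  | nil => rfl
  | cons a l ih =>
    by_cases h : a ∈ prefix_ <;>
      simp_all [List.attach_cons, List.flatMap_cons, List.flatMap_map]

theorem onset_main (n : Int) (prefix_ consonants : List String) :
    onset_possibilities n prefix_ consonants
      = if n < (prefix_.length : Int) then []
        else (pvStep consonants)^[(n - prefix_.length).toNat] [prefix_] := by
  fun_induction onset_possibilities n prefix_ consonants with
  | case1 p h =>
    have h0 : (n - (p.length : Int)).toNat = 0 := by omega
    rw [if_neg (by omega), h0]
    rfl
  | case2 p h ih =>
    rw [attach_guard_flatMap consonants p (fun x => onset_possibilities n (p ++ [x]) consonants)]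
    by_cases hlt : n < (p.length : Int)
    · rw [if_pos hlt]
      apply List.flatMap_eq_nil_iff.mpr
      intro c hc
      simp only [List.mem_filter] at hc
      rw [ih ⟨c, hc.1⟩ (by simpa using hc.2), if_pos (by simp; omega)]
    · rw [if_neg hlt]
      have hk : (n - (p.length : Int)).toNat = (n - ((p.length : Int) + 1)).toNat + 1 := by omega
      rw [hk, Function.iterate_succ_apply]
      have hstep : pvStep consonants [p]
          = (consonants.filter (fun x => !p.contains x)).flatMap (fun c => [p ++ [c]]) := by
        simp [pvStep, List.map_eq_flatMap]
      rw [hstep, pvStep_iter_flatMap]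
      apply List.flatMap_congr
      intro c hc
      simp only [List.mem_filter] at hc
      rw [ih ⟨c, hc.1⟩ (by simpa using hc.2), if_neg (by simp; omega)]
      congr 1
      simp

-- ===== VERDICT (by name: the statement is the Claim_ definition above) =====
theorem onset_possibilities_spec : Claim_equal_onset_possibilities := by
  intro n prefix_ consonants _
  unfold Spec_onset_possibilities onset_possibilities_alt
  rw [onset_main, pvLoop_eq_iterate]
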